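-- pv_equiv track=rewrite | github.com/dhtmaks2540/LeetCode-Algorithm | programmers_problems/67256.py | solution
-- ===== SOURCE A (Python) =====
-- import collections
--
-- def solution(numbers, hand):
--     answer = ''
--
--     left = {
--         1 : (0, 0),
--         4 : (1, 0),
--         7 : (2, 0)
--     }
--
--     right = {
--         3 : (0, 2),
--         6 : (1, 2),
--         9 : (2, 2)
--     }
--
--     center = {
--         2 : (0, 1),
--         5 : (1, 1),
--         8 : (2, 1),
--         0 : (3, 1)
--     }
--
--     def check_distance(row, col, target):
--         queue = collections.deque()
--         cnt = 0
--
--         # 동서남북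
--         dxy = [(1, 0), (-1, 0), (0, 1), (0, -1)]
--         # 방문을 확인하기 위한 리스트
--         visited = [[False] * 3 for _ in range(4)]
--
--         # 시작점 삽입 및 방문처리
--         queue.append((row, col))
--         visited[row][col] = True
--
--         while queue:
--             cnt += 1
--             for _ in range(len(queue)):
--                 now_x, now_y = queue.popleft()
--                 # 현재 목표로 한 곳이라면
--                 if graph[now_x][now_y] == target:
--                     return cnt
--                 for i in range(4):
--                     next_x, next_y = now_x + dxy[i][0], now_y + dxy[i][1]
--                     # 현재 좌표가 정상범위이며 방문하지 않았다면
--                     if 0 <= next_x < 4 and 0 <= next_y < 3 and not visited[next_x][next_y]: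
--                         queue.append((next_x, next_y))
--                         visited[next_x][next_y] = True
--
--     # 번호판 그래프 그리기
--     cnt = 1
--     graph = [[0] * 3 for _ in range(4)]
--     graph[3][0] = '*'
--     graph[3][2] = '#'
--     for i in range(3):
--         for j in range(3):
--             graph[i][j] = cnt
--             cnt += 1
--
--     left_hand_index = (3, 0)
--     right_hand_index = (3, 2)
--
--     for num in numbers:
--         # 현재 숫자가 왼쪽에 있는 숫자라면
--         if num in left:
--             answer += 'L'
--             left_hand_index = left[num]
--         # 현재 숫자가 오른쪽에 있는 숫자라면
--         elif num in right:
--             answer += 'R'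
--             right_hand_index = right[num]
--         # 2,5,8,0이라면
--         else:
--             left_dis = check_distance(left_hand_index[0], left_hand_index[1], num)
--             right_dis = check_distance(right_hand_index[0], right_hand_index[1], num)
--             # 왼쪽이 더 가깝다면
--             if left_dis < right_dis:
--                 left_hand_index = center[num]
--                 answer += 'L'
--             # 오른쪽이 더 가깝다면
--             elif left_dis > right_dis:
--                 right_hand_index = center[num]
--                 answer += 'R'
--             # 같다면 어느 손잡이인지에 따라서
--             else:
--                 if hand == "right":
--                     right_hand_index = center[num]
--                     answer += 'R'
--                 else:
--                     left_hand_index = center[num]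
--                     answer += 'L'
--
--     return answer
-- ===== SOURCE B (Python) =====
-- def solution(numbers, hand):
--     pos = {d: ((d - 1) // 3, (d - 1) % 3) for d in range(1, 10)}
--     pos[0] = (3, 1)
--     L, R = (3, 0), (3, 2)
--     out = []
--     for n in numbers:
--         r, c = pos[n]
--         if c == 0:
--             out.append('L')
--             L = (r, c)
--         elif c == 2:
--             out.append('R')
--             R = (r, c)
--         else:
--             dl = abs(L[0] - r) + abs(L[1] - c)
--             dr = abs(R[0] - r) + abs(R[1] - c)
--             if dl < dr:
--                 out.append('L')
--                 L = (r, c)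
--             elif dl > dr:
--                 out.append('R')
--                 R = (r, c)
--             elif hand == 'right':
--                 out.append('R')
--                 R = (r, c)
--             else:
--                 out.append('L')
--                 L = (r, c)
--     return ''.join(out)
-- ===== Notes on version B (the rewrite author's own statement) =====
-- stated objective: simpler
-- what changed: Replaces the per-digit BFS over a 4x3 grid (deque, visited matrix, graph array) with a closed-form Manhattan distance from a digit-to-coordinate map; the three membership dicts and the grid disappear.
import Mathlib
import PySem

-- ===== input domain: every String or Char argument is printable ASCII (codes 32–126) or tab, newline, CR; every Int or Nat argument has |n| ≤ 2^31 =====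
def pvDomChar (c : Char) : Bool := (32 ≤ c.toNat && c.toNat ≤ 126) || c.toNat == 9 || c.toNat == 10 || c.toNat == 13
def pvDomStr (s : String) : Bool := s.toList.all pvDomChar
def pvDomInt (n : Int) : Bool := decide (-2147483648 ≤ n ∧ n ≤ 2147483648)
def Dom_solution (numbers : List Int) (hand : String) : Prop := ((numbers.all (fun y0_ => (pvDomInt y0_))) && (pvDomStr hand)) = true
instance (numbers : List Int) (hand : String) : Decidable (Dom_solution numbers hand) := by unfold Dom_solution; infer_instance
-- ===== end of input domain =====

-- B replaces A's per-digit BFS over the keypad grid by a closed-form Manhattan distance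
-- from a digit-to-coordinate map (objective: simpler).

-- ===== PORT A =====
-- grid cells: the digits 1..9 and 0, plus the '*' and '#' corner markers
inductive PvCell
  | num : Int → PvCell
  | star
  | hash
deriving DecidableEq, Repr

-- graph[i][j] = v  (i, j natural literals during grid construction)
def pvSetCell (g : List (List PvCell)) (i j : Nat) (v : PvCell) : List (List PvCell) :=
  g.set i ((g.getD i []).set j v)

-- the keypad grid exactly as A builds it: 4x3 of 0, '*' and '#' placed, then 1..9 filled with cnt
def pvGraph : List (List PvCell) :=
  let g := List.replicate 4 (List.replicate 3 (PvCell.num 0))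
  let g := pvSetCell g 3 0 PvCell.star
  let g := pvSetCell g 3 2 PvCell.hash
  ((List.range 3).foldl (fun (st : List (List PvCell) × Int) i =>
      (List.range 3).foldl (fun (st : List (List PvCell) × Int) j =>
        (pvSetCell st.1 i j (PvCell.num st.2), st.2 + 1)) st)
    (g, (1 : Int))).1

-- graph[i][j] (Python int indexing; indices produced by the BFS are always in range)
def pvCellAt (g : List (List PvCell)) (i j : Int) : PvCell :=
  PySem.List.pyGetD (PySem.List.pyGetD g i []) j PvCell.star

-- visited[i][j] and visited[i][j] = True
def pvVGet (v : List (List Bool)) (i j : Int) : Bool :=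
  PySem.List.pyGetD (PySem.List.pyGetD v i []) j true

def pvVSet (v : List (List Bool)) (i j : Int) : List (List Bool) :=
  PySem.List.pySetD v i (PySem.List.pySetD (PySem.List.pyGetD v i []) j true)

-- one iteration of A's while-body: pop len(queue) cells; Sum.inl () = target found (A returns cnt)
def pvBfsInner (g : List (List PvCell)) (target : Int) :
    Nat → List (Int × Int) → List (List Bool) → Sum Unit (List (Int × Int) × List (List Bool))
  | 0, q, v => Sum.inr (q, v)
  | Nat.succ k, q, v =>
    match q with
    | [] => Sum.inr ([], v)   -- unreachable: the counter starts at the queue length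
    | (nowX, nowY) :: rest =>
      if pvCellAt g nowX nowY = PvCell.num target then Sum.inl ()
      else
        let st := [((1 : Int), (0 : Int)), (-1, 0), (0, 1), (0, -1)].foldl
          (fun (st : List (Int × Int) × List (List Bool)) d =>
            let nextX := nowX + d.1
            let nextY := nowY + d.2
            if 0 ≤ nextX ∧ nextX < 4 ∧ 0 ≤ nextY ∧ nextY < 3 ∧ pvVGet st.2 nextX nextY = false then
              (st.1 ++ [(nextX, nextY)], pvVSet st.2 nextX nextY)
            else st)
          (rest, v)
        pvBfsInner g target k st.1 st.2

-- A's while loop; fuel 13 exceeds the number of levels a 12-cell grid BFS can run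
def pvBfsLoop (g : List (List PvCell)) (target : Int) :
    Nat → List (Int × Int) → List (List Bool) → Int → Option Int
  | 0, _, _, _ => none
  | Nat.succ f, q, v, cnt =>
    match q with
    | [] => none    -- Python falls off the loop and returns None
    | _ :: _ =>
      let cnt := cnt + 1
      match pvBfsInner g target q.length q v with
      | Sum.inl _ => some cnt
      | Sum.inr (q', v') => pvBfsLoop g target f q' v' cnt

def pvCheckDistance (g : List (List PvCell)) (row col : Int) (target : Int) : Option Int :=
  let visited := List.replicate 4 (List.replicate 3 false)
  let visited := pvVSet visited row col
  pvBfsLoop g target 13 [(row, col)] visited 0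

def pvLeftD : List (Int × (Int × Int)) := [(1, (0, 0)), (4, (1, 0)), (7, (2, 0))]
def pvRightD : List (Int × (Int × Int)) := [(3, (0, 2)), (6, (1, 2)), (9, (2, 2))]
def pvCenterD : List (Int × (Int × Int)) := [(2, (0, 1)), (5, (1, 1)), (8, (2, 1)), (0, (3, 1))]

-- A's loop body ('if num in left: … elif num in right: … else: BFS comparison')
def pvStepA (g : List (List PvCell)) (hand : String)
    (st : String × (Int × Int) × (Int × Int)) (num : Int) :
    String × (Int × Int) × (Int × Int) :=
  let (ans, lh, rh) := st
  match pvLeftD.lookup num with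
  | some p => (ans ++ "L", p, rh)
  | none =>
    match pvRightD.lookup num with
    | some p => (ans ++ "R", lh, p)
    | none =>
      let leftDis := pvCheckDistance g lh.1 lh.2 num
      let rightDis := pvCheckDistance g rh.1 rh.2 num
      let c := (pvCenterD.lookup num).getD (0, 0)   -- center[num]; present whenever this branch compares
      if leftDis.getD 0 < rightDis.getD 0 then (ans ++ "L", c, rh)
      else if rightDis.getD 0 < leftDis.getD 0 then (ans ++ "R", lh, c)
      else if hand = "right" then (ans ++ "R", lh, c)
      else (ans ++ "L", c, rh)

def solution (numbers : List Int) (hand : String) : String :=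
  (numbers.foldl (pvStepA pvGraph hand) ("", ((3 : Int), (0 : Int)), ((3 : Int), (2 : Int)))).1

-- ===== PORT B =====
-- pos = {d: ((d-1)//3, (d-1)%3) for d in range(1,10)}; pos[0] = (3,1)
def pvPos : PySem.Dict Int (Int × Int) :=
  ((PySem.List.pyRange 1 10 1).foldl
    (fun d dg => d.insert dg (PySem.Int.floordiv (dg - 1) 3, PySem.Int.mod (dg - 1) 3))
    PySem.Dict.empty).insert 0 (3, 1)

-- B's loop body: column decides the hand; middle column compares Manhattan distances
def pvStepB (hand : String)
    (st : List String × (Int × Int) × (Int × Int)) (n : Int) :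
    List String × (Int × Int) × (Int × Int) :=
  let (out, l, r) := st
  let rc := (pvPos.get? n).getD (0, 0)   -- pos[n]; present for every digit 0..9
  if rc.2 = 0 then (out ++ ["L"], rc, r)
  else if rc.2 = 2 then (out ++ ["R"], l, rc)
  else
    let dl := |l.1 - rc.1| + |l.2 - rc.2|
    let dr := |r.1 - rc.1| + |r.2 - rc.2|
    if dl < dr then (out ++ ["L"], rc, r)
    else if dl > dr then (out ++ ["R"], l, rc)
    else if hand = "right" then (out ++ ["R"], l, rc)
    else (out ++ ["L"], rc, r)

def solution_alt (numbers : List Int) (hand : String) : String :=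
  PySem.Str.join ""
    ((numbers.foldl (pvStepB hand) ([], ((3 : Int), (0 : Int)), ((3 : Int), (2 : Int)))).1)

-- ===== PRECONDITION & SPEC =====
-- Pre_ excludes numbers containing a value outside 0..9: there A's BFS returns None for both
-- hands and 'None < None' raises TypeError (B raises KeyError on pos[n]).
def Pre_solution (numbers : List Int) (hand : String) : Prop :=
  ∀ n ∈ numbers, 0 ≤ n ∧ n ≤ 9

instance (numbers : List Int) (hand : String) : Decidable (Pre_solution numbers hand) := by
  unfold Pre_solution; infer_instance

def pvWitness_solution : List Int × String := ([1, 5, 8, 0, 3], "right")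

def Spec_solution (numbers : List Int) (hand : String) (out : String) : Prop := out = solution_alt numbers hand
instance (numbers : List Int) (hand : String) (out : String) : Decidable (Spec_solution numbers hand out) := by unfold Spec_solution; infer_instance

-- ===== CLAIM (what is proved, stated in full; the proofs are below) =====
def Claim_equal_solution : Prop := ∀ (numbers : List Int) (hand : String), Dom_solution numbers hand → Pre_solution numbers hand → Spec_solution numbers hand (solution numbers hand)

-- ===== LEMMAS AND PROOFS =====
-- every position the left (resp. right) hand can occupy
def pvSL : List (Int × Int) := [(3, 0), (0, 0), (1, 0), (2, 0), (0, 1), (1, 1), (2, 1), (3, 1)]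
def pvSR : List (Int × Int) := [(3, 2), (0, 2), (1, 2), (2, 2), (0, 1), (1, 1), (2, 1), (3, 1)]
def pvDigits : List Int := [0, 1, 2, 3, 4, 5, 6, 7, 8, 9]

lemma pvMemDigits {n : Int} (h0 : 0 ≤ n) (h9 : n ≤ 9) : n ∈ pvDigits := by
  simp only [pvDigits, List.mem_cons, List.not_mem_nil, or_false]
  omega

-- the hand string only matters through the test hand = "right"
lemma pvStepA_hand (g : List (List PvCell)) (hand hand' : String)
    (h : (hand = "right") ↔ (hand' = "right"))
    (st : String × (Int × Int) × (Int × Int)) (num : Int) :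
    pvStepA g hand st num = pvStepA g hand' st num := by
  obtain ⟨ans, lh, rh⟩ := st
  simp only [pvStepA, h]

lemma pvStepB_hand (hand hand' : String)
    (h : (hand = "right") ↔ (hand' = "right"))
    (st : List String × (Int × Int) × (Int × Int)) (n : Int) :
    pvStepB hand st n = pvStepB hand' st n := by
  obtain ⟨out, l, r⟩ := st
  simp only [pvStepB, h]

-- the step bodies only append to the accumulated answer
lemma pvStepA_shift (g : List (List PvCell)) (hand ans : String) (lh rh : Int × Int) (num : Int) :
    pvStepA g hand (ans, lh, rh) num =
      (ans ++ (pvStepA g hand ("", lh, rh) num).1, (pvStepA g hand ("", lh, rh) num).2) := by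
  simp only [pvStepA]
  cases pvLeftD.lookup num with
  | some p => simp
  | none =>
    cases pvRightD.lookup num with
    | some p => simp
    | none => split_ifs <;> simp

lemma pvStepB_shift (hand : String) (out : List String) (l r : Int × Int) (n : Int) :
    pvStepB hand (out, l, r) n =
      (out ++ (pvStepB hand ([], l, r) n).1, (pvStepB hand ([], l, r) n).2) := by
  simp only [pvStepB]
  split_ifs <;> simp

-- the finite core: on every reachable pair of hand positions and every digit the two
-- step bodies emit the same letter and move to the same positions, which stay reachable
lemma pvStep_core : ∀ (b : Bool), ∀ lh ∈ pvSL, ∀ rh ∈ pvSR, ∀ n ∈ pvDigits,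
    (pvStepB (if b then "right" else "") ([], lh, rh) n).1 =
      [(pvStepA pvGraph (if b then "right" else "") ("", lh, rh) n).1] ∧
    (pvStepB (if b then "right" else "") ([], lh, rh) n).2 =
      (pvStepA pvGraph (if b then "right" else "") ("", lh, rh) n).2 ∧
    (pvStepA pvGraph (if b then "right" else "") ("", lh, rh) n).2.1 ∈ pvSL ∧
    (pvStepA pvGraph (if b then "right" else "") ("", lh, rh) n).2.2 ∈ pvSR := by
  decide

-- ''.join with the empty separator is concatenation
lemma pvIntercalate_nil (xs : List (List Char)) : List.intercalate [] xs = xs.flatten := by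
  induction xs with
  | nil => rfl
  | cons x xs ih =>
    cases xs with
    | nil => simp [List.intercalate]
    | cons y ys =>
      simp only [List.intercalate, List.intersperse] at *
      simp_all

lemma pvJoin_append (xs : List String) (s : String) :
    PySem.Str.join "" (xs ++ [s]) = PySem.Str.join "" xs ++ s := by
  simp only [PySem.Str.join, String.toList_empty, List.map_append, List.map_cons, List.map_nil,
    PySem.Chars.join, pvIntercalate_nil, List.flatten_append]
  simp

-- main loop invariant, by induction on the remaining numbers
lemma pvFold_eq (numbers : List Int) :
    ∀ (hand ans : String) (out : List String) (lh rh : Int × Int),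
      (∀ n ∈ numbers, 0 ≤ n ∧ n ≤ 9) → lh ∈ pvSL → rh ∈ pvSR →
      ans = PySem.Str.join "" out →
      (numbers.foldl (pvStepA pvGraph hand) (ans, lh, rh)).1 =
        PySem.Str.join "" ((numbers.foldl (pvStepB hand) (out, lh, rh)).1) := by
  induction numbers with
  | nil => intro hand ans out lh rh _ _ _ hjoin; simpa using hjoin
  | cons n ns ih =>
    intro hand ans out lh rh hpre hl hr hjoin
    have hn := hpre n (List.mem_cons_self ..)
    have hcore := by
      refine pvStep_core (hand == "right") lh hl rh hr n (pvMemDigits hn.1 hn.2)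
    have hhA : pvStepA pvGraph hand ("", lh, rh) n =
        pvStepA pvGraph (if (hand == "right") then "right" else "") ("", lh, rh) n := by
      refine pvStepA_hand _ _ _ ?_ _ _
      cases hh : (hand == "right") <;> simp_all
    have hhB : pvStepB hand ([], lh, rh) n =
        pvStepB (if (hand == "right") then "right" else "") ([], lh, rh) n := by
      refine pvStepB_hand _ _ ?_ _ _
      cases hh : (hand == "right") <;> simp_all
    simp only [List.foldl_cons]
    rw [pvStepA_shift, pvStepB_shift, hhA, hhB]
    rcases hcore with ⟨h1, h2, h3, h4⟩
    rw [h2]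
    exact ih hand _ _ _ _ (fun m hm => hpre m (List.mem_cons_of_mem _ hm)) h3 h4
      (by rw [hjoin, h1, pvJoin_append])

-- ===== VERDICT (by name: the statement is the Claim_ definition above) =====
theorem solution_spec : Claim_equal_solution := by
  intro numbers hand _ hpre
  unfold Spec_solution solution solution_alt
  exact pvFold_eq numbers hand "" [] _ _ hpre (by decide) (by decide) rfl
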